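-- pv_equiv track=rewrite | github.com/aosp-mirror/platform_build | tools/mk2bp_catalog.py | count_deps
-- ===== SOURCE A (Python) =====
-- def count_deps(depsdb, module, seen):
--   """Based on the depsdb, count the number of transitive dependencies.
--
--   You can pass in an reversed dependency graph to count the number of
--   modules that depend on the module."""
--   count = 0
--   seen.append(module)
--   if module in depsdb:
--     for dep in depsdb[module]:
--       if dep in seen:
--         continue
--       count += 1 + count_deps(depsdb, dep, seen)
--   return count
-- ===== SOURCE B (Python) =====
-- def count_deps(depsdb, module, seen):
--   """Iterative explicit-stack DFS; count = number of nodes appended after module."""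
--   seen.append(module)
--   base = len(seen)
--   stack = list(reversed(depsdb.get(module, [])))
--   while stack:
--     x = stack.pop()
--     if x in seen:
--       continue
--     seen.append(x)
--     stack.extend(reversed(depsdb.get(x, [])))
--   return len(seen) - base
-- ===== Notes on version B (the rewrite author's own statement) =====
-- stated objective: alternative
-- what changed: Replaced the recursive DFS with an iterative explicit-stack DFS that marks nodes at pop time and returns the count as the number of new nodes appended to seen (length difference) instead of accumulating 1+recursive counts.
import Mathlib
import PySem

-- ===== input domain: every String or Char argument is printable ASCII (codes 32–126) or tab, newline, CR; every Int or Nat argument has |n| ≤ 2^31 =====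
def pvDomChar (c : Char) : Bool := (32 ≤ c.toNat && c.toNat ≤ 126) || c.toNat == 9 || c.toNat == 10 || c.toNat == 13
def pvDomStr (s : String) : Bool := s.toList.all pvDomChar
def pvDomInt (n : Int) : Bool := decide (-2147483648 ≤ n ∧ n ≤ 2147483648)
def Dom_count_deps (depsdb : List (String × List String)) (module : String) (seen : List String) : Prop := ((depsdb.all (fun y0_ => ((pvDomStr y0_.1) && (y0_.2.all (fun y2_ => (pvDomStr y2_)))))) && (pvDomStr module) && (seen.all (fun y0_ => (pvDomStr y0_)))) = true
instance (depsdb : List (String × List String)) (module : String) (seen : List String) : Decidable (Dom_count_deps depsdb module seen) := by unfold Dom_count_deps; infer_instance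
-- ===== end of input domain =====

-- B replaces A's recursive DFS by an iterative explicit-stack DFS, returning the number of nodes
-- newly appended to `seen` (a length difference) instead of accumulating recursive counts.
-- Both A and B mutate the Python argument `seen` in place, appending the same nodes in the same
-- order; the equivalence proved here is about the RETURN value.

-- ===== PORT A =====
-- all strings occurring in depsdb (keys and dep lists), deduplicated: used only for the
-- termination measure of the ports (the Python recursion terminates for the same reason)
def pvUniv (ddb : List (String × List String)) : List String :=
  (ddb.flatMap (fun kv => kv.1 :: kv.2)).dedup

-- number of universe strings not yet in seen (termination measure)
def pvRem (ddb : List (String × List String)) (s : List String) : Nat :=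
  ((pvUniv ddb).filter (fun x => x ∉ s)).length

theorem pvRem_append_lt (ddb : List (String × List String)) {s : List String} {x : String}
    (hx : x ∈ pvUniv ddb) (hnx : x ∉ s) : pvRem ddb (s ++ [x]) < pvRem ddb s := by
  unfold pvRem
  have hnd : (pvUniv ddb).Nodup := List.nodup_dedup _
  set U := pvUniv ddb with hU
  have h1 : U.filter (fun y => y ∉ s ++ [x]) = (U.filter (fun y => y ∉ s)).filter (fun y => y != x) := by
    rw [List.filter_filter]
    apply List.filter_congr
    intro a _
    by_cases h1 : a ∈ s <;> by_cases h2 : a = x <;> simp [h1, h2]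
  have hmemf : x ∈ U.filter (fun y => y ∉ s) := by
    simp only [List.mem_filter, decide_eq_true_eq]
    exact ⟨hx, hnx⟩
  have hndf : (U.filter (fun y => y ∉ s)).Nodup := hnd.filter _
  rw [h1, ← List.Nodup.erase_eq_filter hndf x]
  have hlen := List.length_erase_of_mem hmemf
  have hpos := List.length_pos_of_mem hmemf
  omega

theorem lookup_eq_none_of_not_mem_univ (ddb : List (String × List String)) {x : String}
    (hx : x ∉ pvUniv ddb) : ddb.lookup x = none := by
  induction ddb with
  | nil => rfl
  | cons kv rest ih =>
    have hmem : ∀ y, y ∈ pvUniv rest → y ∈ pvUniv (kv :: rest) := by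
      intro y hy
      unfold pvUniv at *
      simp only [List.mem_dedup, List.flatMap_cons, List.mem_append] at *
      exact Or.inr hy
    have hne : x ≠ kv.1 := by
      intro h
      apply hx
      unfold pvUniv
      simp only [List.mem_dedup, List.flatMap_cons, List.mem_append, List.mem_cons]
      exact Or.inl (Or.inl h)
    simp only [List.lookup]
    rw [show (x == kv.1) = false by simp [hne]]
    exact ih (fun h => hx (hmem x h))

-- A's recursion: cdA is one call of count_deps, cdFor is its `for dep in depsdb[module]` loop.
-- `fuel` is a totality guard only (Python's recursion depth is bounded by the same measure);
-- count_deps supplies fuel that is provably never exhausted.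
mutual
def cdA (fuel : Nat) (ddb : List (String × List String)) (module : String)
    (seen : List String) : Int × List String :=
  match fuel with
  | 0 => (0, seen)  -- never reached with the fuel count_deps supplies
  | f + 1 =>
    let seen1 := seen ++ [module]          -- seen.append(module)
    match ddb.lookup module with           -- if module in depsdb: ... depsdb[module]
    | none => (0, seen1)
    | some deps => cdFor f ddb deps 0 seen1
  termination_by (fuel, 0, (0 : Nat))

def cdFor (fuel : Nat) (ddb : List (String × List String)) (deps : List String)
    (count : Int) (seen : List String) : Int × List String :=
  match deps with
  | [] => (count, seen)
  | d :: rest =>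
    if d ∈ seen then cdFor fuel ddb rest count seen      -- continue
    else
      let r := cdA fuel ddb d seen                       -- count += 1 + count_deps(...)
      cdFor fuel ddb rest (count + 1 + r.1) r.2
  termination_by (fuel, 1, deps.length)
end

def count_deps (depsdb : List (String × List String)) (module : String) (seen : List String) : Int :=
  (cdA ((depsdb.flatMap (fun kv => kv.1 :: kv.2)).length + 1) depsdb module seen).1

-- ===== PORT B =====
-- the while-stack loop of Source B; the Lean list's head is the Python stack's top (end of list),
-- so Python's `stack.extend(reversed(deps))` is `deps ++ st` here
def cdLoop (ddb : List (String × List String)) (stack : List String)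
    (seen : List String) : List String :=
  match stack with
  | [] => seen
  | x :: st =>
    if x ∈ seen then cdLoop ddb st seen
    else cdLoop ddb ((ddb.lookup x).getD [] ++ st) (seen ++ [x])
termination_by (pvRem ddb seen, stack.length)
decreasing_by
  · exact Prod.Lex.right _ (Nat.lt_succ_self _)
  · by_cases hx : x ∈ pvUniv ddb
    · exact Prod.Lex.left _ _ (pvRem_append_lt ddb hx (by assumption))
    · rw [lookup_eq_none_of_not_mem_univ ddb hx]
      have heq : pvRem ddb (seen ++ [x]) = pvRem ddb seen := by
        unfold pvRem
        congr 1
        apply List.filter_congr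
        intro a ha
        have hax : a ≠ x := fun h => hx (h ▸ ha)
        by_cases h1 : a ∈ seen <;> simp [h1, hax]
      rw [heq]
      exact Prod.Lex.right _ (by simp)

def count_deps_alt (depsdb : List (String × List String)) (module : String) (seen : List String) : Int :=
  let seen1 := seen ++ [module]                               -- seen.append(module); base = len(seen)
  let fin := cdLoop depsdb ((depsdb.lookup module).getD []) seen1
  (fin.length : Int) - (seen1.length : Int)                   -- len(seen) - base

-- ===== PRECONDITION & SPEC =====
def Spec_count_deps (depsdb : List (String × List String)) (module : String) (seen : List String) (out : Int) : Prop := out = count_deps_alt depsdb module seen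
instance (depsdb : List (String × List String)) (module : String) (seen : List String) (out : Int) : Decidable (Spec_count_deps depsdb module seen out) := by unfold Spec_count_deps; infer_instance

-- ===== CLAIM (what is proved, stated in full; the proofs are below) =====
def Claim_equal_count_deps : Prop := ∀ (depsdb : List (String × List String)) (module : String) (seen : List String), Dom_count_deps depsdb module seen → Spec_count_deps depsdb module seen (count_deps depsdb module seen)

-- ===== LEMMAS AND PROOFS =====

theorem pvRem_mono (ddb : List (String × List String)) {s t : List String}
    (h : ∀ x, x ∈ s → x ∈ t) : pvRem ddb t ≤ pvRem ddb s := by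
  unfold pvRem
  exact List.Sublist.length_le
    (List.monotone_filter_right _ (by intro a; simp only [decide_eq_true_eq]; exact fun hnt hs => hnt (h a hs)))

theorem lookup_mem_univ (ddb : List (String × List String)) {x : String} {v : List String}
    (h : ddb.lookup x = some v) : ∀ d ∈ v, d ∈ pvUniv ddb := by
  induction ddb with
  | nil => simp [List.lookup] at h
  | cons kv rest ih =>
    intro d hd
    simp only [List.lookup] at h
    unfold pvUniv
    simp only [List.mem_dedup, List.flatMap_cons, List.mem_append, List.mem_cons]
    cases hbe : x == kv.1 with
    | true =>
      rw [hbe] at h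
      simp only at h
      exact Or.inl (Or.inr (by cases h; exact hd))
    | false =>
      rw [hbe] at h
      simp only at h
      have := ih h d hd
      unfold pvUniv at this
      simp only [List.mem_dedup] at this
      exact Or.inr this

theorem cdLoop_nil (ddb : List (String × List String)) (seen : List String) :
    cdLoop ddb [] seen = seen := by
  rw [cdLoop.eq_def]

theorem cdLoop_cons_mem (ddb : List (String × List String)) {x : String} (st seen : List String)
    (h : x ∈ seen) : cdLoop ddb (x :: st) seen = cdLoop ddb st seen := by
  rw [cdLoop.eq_def]; simp [h]

theorem cdLoop_cons_not_mem (ddb : List (String × List String)) {x : String} (st seen : List String)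
    (h : x ∉ seen) :
    cdLoop ddb (x :: st) seen = cdLoop ddb ((ddb.lookup x).getD [] ++ st) (seen ++ [x]) := by
  rw [cdLoop.eq_def]; simp [h]

theorem cdLoop_prefix (ddb : List (String × List String)) (stack seen : List String) :
    ∀ x ∈ seen, x ∈ cdLoop ddb stack seen := by
  fun_induction cdLoop ddb stack seen with
  | case1 seen => intro x hx; exact hx
  | case2 seen x st hmem ih => exact ih
  | case3 seen x st hmem ih =>
    intro y hy; exact ih y (List.mem_append_left _ hy)

theorem cdLoop_append (ddb : List (String × List String)) (a s : List String) :
    ∀ b, cdLoop ddb (a ++ b) s = cdLoop ddb b (cdLoop ddb a s) := by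
  fun_induction cdLoop ddb a s with
  | case1 s => intro b; rw [List.nil_append]
  | case2 s x st hmem ih =>
    intro b
    rw [List.cons_append, cdLoop_cons_mem ddb _ _ hmem, ih]
  | case3 s x st hmem ih =>
    intro b
    rw [List.cons_append, cdLoop_cons_not_mem ddb _ _ hmem]
    rw [show (ddb.lookup x).getD [] ++ (st ++ b) = ((ddb.lookup x).getD [] ++ st) ++ b by
      simp [List.append_assoc]]
    rw [ih b]

-- main invariant: A's inner loop equals the stack loop, with the count a length difference
theorem cdFor_eq (fuel : Nat) :
    ∀ deps (ddb : List (String × List String)) (c : Int) (s : List String),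
      (∀ d ∈ deps, d ∈ pvUniv ddb) → pvRem ddb s ≤ fuel →
      cdFor fuel ddb deps c s =
        (c + ((cdLoop ddb deps s).length : Int) - (s.length : Int), cdLoop ddb deps s) := by
  induction fuel using Nat.strong_induction_on with
  | _ fuel SIH =>
    intro deps
    induction deps with
    | nil =>
      intro ddb c s _ _
      rw [cdFor, cdLoop_nil]; simp
    | cons d rest ih =>
      intro ddb c s hsub hrem
      by_cases hds : d ∈ s
      · rw [cdFor]
        simp only [if_pos hds]
        rw [cdLoop_cons_mem ddb _ _ hds]
        exact ih ddb c s (fun x hx => hsub x (List.mem_cons_of_mem _ hx)) hrem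
      · have hdU : d ∈ pvUniv ddb := hsub d List.mem_cons_self
        have hrem1 : 1 ≤ pvRem ddb s := by
          unfold pvRem
          have hm : d ∈ (pvUniv ddb).filter (fun x => x ∉ s) := by
            simp only [List.mem_filter, decide_eq_true_eq]
            exact ⟨hdU, hds⟩
          exact List.length_pos_of_mem hm
        obtain ⟨f, rfl⟩ : ∃ f, fuel = f + 1 := ⟨fuel - 1, by omega⟩
        have hlt : pvRem ddb (s ++ [d]) ≤ f := by
          have := pvRem_append_lt ddb hdU hds
          omega
        rw [cdFor]
        simp only [if_neg hds]
        rw [cdLoop_cons_not_mem ddb _ _ hds]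
        cases hlk : ddb.lookup d with
        | none =>
          have hA : cdA (f + 1) ddb d s = (0, s ++ [d]) := by
            rw [cdA, hlk]
          rw [hA]
          dsimp only
          simp only [Option.getD_none, List.nil_append]
          rw [ih ddb (c + 1 + 0) (s ++ [d])
            (fun x hx => hsub x (List.mem_cons_of_mem _ hx))
            (le_trans (pvRem_mono ddb (fun y hy => List.mem_append_left _ hy)) hrem)]
          simp only [Prod.mk.injEq, and_true]
          simp only [List.length_append, List.length_singleton]
          push_cast
          ring
        | some deps' =>
          have hA : cdA (f + 1) ddb d s = cdFor f ddb deps' 0 (s ++ [d]) := by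
            rw [cdA, hlk]
          have hrec := SIH f (Nat.lt_succ_self f) deps' ddb 0 (s ++ [d])
            (lookup_mem_univ ddb hlk) hlt
          rw [hA, hrec]
          dsimp only
          simp only [Option.getD_some]
          set t := cdLoop ddb deps' (s ++ [d]) with ht
          have htpre : ∀ x ∈ s, x ∈ t := by
            intro x hx
            exact cdLoop_prefix ddb deps' (s ++ [d]) x (List.mem_append_left _ hx)
          rw [ih ddb (c + 1 + (0 + (t.length : Int) - ((s ++ [d]).length : Int))) t
            (fun x hx => hsub x (List.mem_cons_of_mem _ hx))
            (le_trans (pvRem_mono ddb htpre) hrem)]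
          rw [cdLoop_append ddb deps' (s ++ [d]) rest, ← ht]
          simp only [Prod.mk.injEq, and_true]
          simp only [List.length_append, List.length_singleton]
          push_cast
          ring

theorem pvRem_le (ddb : List (String × List String)) (s : List String) :
    pvRem ddb s ≤ (ddb.flatMap (fun kv => kv.1 :: kv.2)).length := by
  unfold pvRem pvUniv
  calc ((ddb.flatMap (fun kv => kv.1 :: kv.2)).dedup.filter (fun x => x ∉ s)).length
      ≤ (ddb.flatMap (fun kv => kv.1 :: kv.2)).dedup.length :=
        List.Sublist.length_le List.filter_sublist
    _ ≤ (ddb.flatMap (fun kv => kv.1 :: kv.2)).length :=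
        List.Sublist.length_le (List.dedup_sublist _)

-- ===== VERDICT (by name: the statement is the Claim_ definition above) =====
theorem count_deps_spec : Claim_equal_count_deps := by
  unfold Claim_equal_count_deps Spec_count_deps
  intro ddb m s _
  unfold count_deps count_deps_alt
  rw [cdA]
  cases hlk : ddb.lookup m with
  | none =>
    dsimp only
    simp only [Option.getD_none]
    rw [cdLoop_nil]
    simp
  | some deps =>
    dsimp only
    simp only [Option.getD_some]
    rw [cdFor_eq ((ddb.flatMap (fun kv => kv.1 :: kv.2)).length) deps ddb 0 (s ++ [m])
      (lookup_mem_univ ddb hlk) (pvRem_le ddb (s ++ [m]))]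
    push_cast
    ring
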